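-- pv_equiv track=rewrite | github.com/mariush2/project-euler | problems21-25.py | name_score
-- ===== SOURCE A (Python) =====
-- import string
--
-- def name_score(name):
--     name = name.upper()
--     alfabet = list(string.ascii_uppercase)
--     sum = 0
--     for letter in name:
--         for i in range(len(alfabet)):
--             if(letter == alfabet[i]):
--                 sum += i + 1
--                 break
--     return sum
-- ===== SOURCE B (Python) =====
-- def name_score(name):
--     return sum(ord(c) - 64 for c in name.upper() if 'A' <= c <= 'Z')
-- ===== Notes on version B (the rewrite author's own statement) =====
-- stated objective: simpler
-- what changed: B drops A's 26-letter alphabet table and inner linear search, computing each letter's position directly as ord(c)-64 in a single generator-expression sum over the uppercased name.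
import Mathlib
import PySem

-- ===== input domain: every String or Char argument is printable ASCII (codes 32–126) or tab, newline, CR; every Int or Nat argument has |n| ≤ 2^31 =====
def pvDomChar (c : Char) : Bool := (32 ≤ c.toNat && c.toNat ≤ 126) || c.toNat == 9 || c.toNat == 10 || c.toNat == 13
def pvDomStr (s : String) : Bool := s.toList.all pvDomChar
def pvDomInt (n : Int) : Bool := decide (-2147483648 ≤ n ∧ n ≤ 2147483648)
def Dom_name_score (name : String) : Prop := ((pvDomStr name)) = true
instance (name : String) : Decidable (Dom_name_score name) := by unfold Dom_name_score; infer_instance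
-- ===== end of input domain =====

-- B replaces A's per-letter linear scan of an alphabet table by direct ord-arithmetic (ord(c)-64 over the A–Z characters): simpler, no table.

-- ===== PORT A =====
-- alfabet = list(string.ascii_uppercase)
def alfabetA : List Char :=
  ['A','B','C','D','E','F','G','H','I','J','K','L','M',
   'N','O','P','Q','R','S','T','U','V','W','X','Y','Z']

-- the inner 'for i in range(len(alfabet)): if letter == alfabet[i]: sum += i + 1; break'
-- as a recursion carrying the index i; returns the contribution added to sum (0 when the loop falls through)
def innerA (letter : Char) : Int → List Char → Int
  | _, [] => 0
  | i, c :: rest => if letter = c then i + 1 else innerA letter (i + 1) rest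

def name_score (name : String) : Int :=
  (PySem.Str.upper name).toList.foldl (fun s letter => s + innerA letter 0 alfabetA) 0

-- ===== PORT B =====
def name_score_alt (name : String) : Int :=
  (((PySem.Str.upper name).toList.filter (fun c => 'A' ≤ c && c ≤ 'Z')).map
    (fun c => (c.toNat : Int) - 64)).sum

-- ===== PRECONDITION & SPEC =====
def Spec_name_score (name : String) (out : Int) : Prop := out = name_score_alt name
instance (name : String) (out : Int) : Decidable (Spec_name_score name out) := by unfold Spec_name_score; infer_instance

-- ===== CLAIM (what is proved, stated in full; the proofs are below) =====
def Claim_equal_name_score : Prop := ∀ (name : String), Dom_name_score name → Spec_name_score name (name_score name)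

-- ===== LEMMAS AND PROOFS =====

theorem char_toNat_ofNat (k : Nat) (h : k < 55296) : (Char.ofNat k).toNat = k := by
  unfold Char.ofNat
  split
  · simp [Char.ofNatAux, Char.toNat]
  · rename_i hv; exact absurd (Or.inl (by omega)) hv

theorem char_eq_iff_toNat (c d : Char) : c = d ↔ c.toNat = d.toNat := by
  constructor
  · rintro rfl; rfl
  · intro h; exact Char.ext (UInt32.toNat_inj.mp h)

theorem alfabetA_eq : alfabetA = (List.range' 65 26).map Char.ofNat := by decide

theorem innerA_gen (c : Char) (i : Int) (a n : Nat) (hn : a + n ≤ 55296) :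
    innerA c i ((List.range' a n).map Char.ofNat) =
      if a ≤ c.toNat ∧ c.toNat < a + n then i + ((c.toNat : Int) - a) + 1 else 0 := by
  induction n generalizing a i with
  | zero => rw [if_neg (by omega)]; simp [innerA]
  | succ n ih =>
    rw [List.range'_succ, List.map_cons]
    rw [show innerA c i (Char.ofNat a :: (List.range' (a+1) n).map Char.ofNat)
          = if c = Char.ofNat a then i + 1
            else innerA c (i + 1) ((List.range' (a+1) n).map Char.ofNat) from rfl]
    have hiff : c = Char.ofNat a ↔ c.toNat = a := by
      rw [char_eq_iff_toNat, char_toNat_ofNat a (by omega)]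
    by_cases h : c.toNat = a
    · rw [if_pos (hiff.mpr h), if_pos (by omega)]
      omega
    · rw [if_neg (fun hc => h (hiff.mp hc)), ih (i + 1) (a + 1) (by omega)]
      split_ifs <;> omega

theorem char_range_iff (c : Char) :
    ('A' ≤ c && c ≤ 'Z') = true ↔ 65 ≤ c.toNat ∧ c.toNat ≤ 90 := by
  simp only [Bool.and_eq_true, decide_eq_true_eq, Char.le_def, UInt32.le_iff_toNat_le]
  exact Iff.rfl

theorem innerA_char (c : Char) :
    innerA c 0 alfabetA =
      if ('A' ≤ c && c ≤ 'Z') = true then ((c.toNat : Int) - 64) else 0 := by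
  rw [alfabetA_eq, innerA_gen c 0 65 26 (by norm_num)]
  by_cases h : 65 ≤ c.toNat ∧ c.toNat ≤ 90
  · rw [if_pos (by omega), if_pos ((char_range_iff c).mpr h)]; omega
  · rw [if_neg (by omega), if_neg (fun hb => h ((char_range_iff c).mp hb))]

theorem fold_eq_sum (u : List Char) (a : Int) :
    u.foldl (fun s letter => s + innerA letter 0 alfabetA) a =
      a + ((u.filter (fun c => 'A' ≤ c && c ≤ 'Z')).map (fun c => (c.toNat : Int) - 64)).sum := by
  induction u generalizing a with
  | nil => simp
  | cons c u ih =>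
    rw [List.foldl_cons, ih]
    by_cases p : ('A' ≤ c && c ≤ 'Z') = true
    · simp [p, innerA_char c]; ring
    · simp [p, innerA_char c]

-- ===== VERDICT (by name: the statement is the Claim_ definition above) =====
theorem name_score_spec : Claim_equal_name_score := by
  intro name _
  unfold Spec_name_score name_score name_score_alt
  rw [fold_eq_sum]
  simp
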